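-- pv_equiv track=rewrite | github.com/pypi-data/pypi-mirror-400 | packages/filtarr/filtarr-3.0.0.tar.gz/filtarr-3.0.0/src/filtarr/criteria.py | _contains_edition_phrase
-- ===== SOURCE A (Python) =====
-- def _contains_edition_phrase(title_lower: str, phrase: str) -> bool:
--     """Return True if `phrase` appears in `title_lower` with word/separator boundaries.
--
--     A valid match must be surrounded (on both sides) by either the start/end of the string
--     or a common separator character (space, dot, dash, underscore). This prevents matches
--     where the phrase is embedded inside a larger word, e.g. "aspecial.edition" or
--     "collectors editions".
--
--     Args:
--         title_lower: The release title, must be pre-lowercased by the caller.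
--         phrase: The phrase to search for (should be lowercase).
--     """
--     separators = " .-_"
--     start = 0
--
--     while True:
--         index = title_lower.find(phrase, start)
--         if index == -1:
--             return False
--
--         before_ok = index == 0 or title_lower[index - 1] in separators
--         end_index = index + len(phrase)
--         after_ok = end_index == len(title_lower) or title_lower[end_index] in separators
--
--         if before_ok and after_ok:
--             return True
--
--         start = index + 1
-- ===== SOURCE B (Python) =====
-- def _contains_edition_phrase(title_lower: str, phrase: str) -> bool:
--     """Single comprehension over all candidate positions: at each index i check the
--     slice and both separator/edge boundaries directly (no find/restart scan)."""
--     seps = " .-_"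
--     n = len(title_lower)
--     m = len(phrase)
--     return any(
--         title_lower[i:i + m] == phrase
--         and (i == 0 or title_lower[i - 1] in seps)
--         and (i + m == n or title_lower[i + m] in seps)
--         for i in range(n - m + 1)
--     )
-- ===== Notes on version B (the rewrite author's own statement) =====
-- stated objective: simpler
-- what changed: Replaced A's find/restart while-loop (repeated str.find with manual restart indices) by a single any() comprehension over all candidate positions that checks the slice and both separator/edge boundaries directly at each index.
import Mathlib
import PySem

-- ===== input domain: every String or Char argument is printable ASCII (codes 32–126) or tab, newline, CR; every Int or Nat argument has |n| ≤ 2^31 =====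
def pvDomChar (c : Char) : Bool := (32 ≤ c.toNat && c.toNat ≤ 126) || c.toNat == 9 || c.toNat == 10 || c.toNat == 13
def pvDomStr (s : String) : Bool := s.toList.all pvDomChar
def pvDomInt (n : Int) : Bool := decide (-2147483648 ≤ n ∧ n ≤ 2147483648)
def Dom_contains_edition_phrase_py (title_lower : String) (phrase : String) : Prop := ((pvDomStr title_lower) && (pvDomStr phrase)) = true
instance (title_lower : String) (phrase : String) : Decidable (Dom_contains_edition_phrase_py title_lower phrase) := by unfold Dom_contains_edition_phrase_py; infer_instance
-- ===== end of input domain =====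

-- B replaces A's find/restart scan by one pass over all candidate positions, checking slice
-- and boundaries directly at each index (objective: simpler; not claimed faster).

-- shared helper: Python's `c in " .-_"` for a single character
def pvIsSep (c : Char) : Bool := (" .-_".toList).contains c

-- ===== PORT A =====
-- termination helper: CPython's find(sub, start) gives -1 when start is past the end
theorem pvFindFrom_of_len_lt (t p : List Char) (k : Nat) (h : t.length < k) :
    PySem.Chars.findFrom t p (k : Int) none = -1 := by
  simp only [PySem.Chars.findFrom]
  have h1 : ¬ ((k : Int) < 0) := by omega
  simp only [if_neg h1]
  rw [if_pos (by exact_mod_cast h)]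

-- the `while True` loop of A; `start` only ever takes nonneg values, kept as Nat
def pvALoop (t p : List Char) (start : Nat) : Bool :=
  let index := PySem.Chars.findFrom t p (start : Int) none
  if hneg : index = -1 then false
  else
    let i := index.toNat
    -- t.getD (i-1) ' ' / t.getD end_index ' ' are Python's t[i-1] / t[end_index]:
    -- both accesses are guarded so the index is in range whenever evaluated
    let before_ok := i == 0 || pvIsSep (t.getD (i - 1) ' ')
    let end_index := i + p.length
    let after_ok := end_index == t.length || pvIsSep (t.getD end_index ' ')
    if before_ok && after_ok then true
    else pvALoop t p (i + 1)
termination_by t.length + 1 - start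
decreasing_by
  have hle : start ≤ t.length := by
    by_contra hgt
    exact hneg (pvFindFrom_of_len_lt t p start (by omega))
  have hspec := PySem.Chars.findFrom_natCast_spec t p start hle hneg
  have : (start : Int) ≤ PySem.Chars.findFrom t p (start : Int) none := hspec.1
  have hi : start ≤ (PySem.Chars.findFrom t p (start : Int) none).toNat := by
    omega
  omega

def contains_edition_phrase_py (title_lower : String) (phrase : String) : Bool :=
  pvALoop title_lower.toList phrase.toList 0

-- ===== PORT B =====
def contains_edition_phrase_py_alt (title_lower : String) (phrase : String) : Bool :=
  let t := title_lower.toList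
  let p := phrase.toList
  let n : Int := t.length
  let m : Int := p.length
  (PySem.List.pyRange 0 (n - m + 1) 1).any fun i =>
    decide (PySem.List.slice t (some i) (some (i + m)) = p)
      && (i == 0 || pvIsSep ((PySem.List.pyGet? t (i - 1)).getD ' '))
      && (i + m == n || pvIsSep ((PySem.List.pyGet? t (i + m)).getD ' '))

-- ===== PRECONDITION & SPEC =====
def Spec_contains_edition_phrase_py (title_lower : String) (phrase : String) (out : Bool) : Prop := out = contains_edition_phrase_py_alt title_lower phrase
instance (title_lower : String) (phrase : String) (out : Bool) : Decidable (Spec_contains_edition_phrase_py title_lower phrase out) := by unfold Spec_contains_edition_phrase_py; infer_instance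

-- ===== CLAIM (what is proved, stated in full; the proofs are below) =====
def Claim_equal_contains_edition_phrase_py : Prop := ∀ (title_lower : String) (phrase : String), Dom_contains_edition_phrase_py title_lower phrase → Spec_contains_edition_phrase_py title_lower phrase (contains_edition_phrase_py title_lower phrase)

-- ===== LEMMAS AND PROOFS =====

-- "phrase occurs at i with separator/edge boundaries on both sides"
def pvGoodP (t p : List Char) (i : Nat) : Prop :=
  p <+: t.drop i ∧
  (i = 0 ∨ pvIsSep (t.getD (i - 1) ' ') = true) ∧
  (i + p.length = t.length ∨ pvIsSep (t.getD (i + p.length) ' ') = true)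

-- prefix transported down a drop is an infix
theorem pvPrefix_drop_infix (t p : List Char) (s i : Nat) (hsi : s ≤ i)
    (h : p <+: t.drop i) : p <:+: t.drop s := by
  have hdd : t.drop i = (t.drop s).drop (i - s) := by
    rw [List.drop_drop]; congr 1; omega
  rw [hdd] at h
  exact h.isInfix.trans (List.drop_suffix _ _).isInfix

-- the found index is at most the length of the string
theorem pvFindFrom_le_len (t p : List Char) (s : Nat) (hle : s ≤ t.length)
    (hneg : PySem.Chars.findFrom t p (s : Int) none ≠ -1) :
    (PySem.Chars.findFrom t p (s : Int) none).toNat ≤ t.length := by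
  rw [PySem.Chars.findFrom_natCast t p s hle] at *
  split at hneg
  · exact absurd rfl hneg
  · have h1 := PySem.Chars.find_le_length (t.drop s) p
    have h2 : (t.drop s).length = t.length - s := List.length_drop ..
    omega

-- the boundary test of the loop body is exactly pvGoodP's boundary part
theorem pvBound_iff (t p : List Char) (i : Nat) :
    ((i == 0 || pvIsSep (t.getD (i - 1) ' ')) &&
      (i + p.length == t.length || pvIsSep (t.getD (i + p.length) ' '))) = true ↔
    ((i = 0 ∨ pvIsSep (t.getD (i - 1) ' ') = true) ∧
      (i + p.length = t.length ∨ pvIsSep (t.getD (i + p.length) ' ') = true)) := by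
  simp [Bool.or_eq_true, Bool.and_eq_true, beq_iff_eq]

theorem pvALoop_iff (t p : List Char) (start : Nat) :
    pvALoop t p start = true ↔ ∃ i, start ≤ i ∧ i ≤ t.length ∧ pvGoodP t p i := by
  induction start using pvALoop.induct (t := t) (p := p) with
  | case1 start _idx hneg =>
    have hneg' : PySem.Chars.findFrom t p (start : Int) none = -1 := hneg
    rw [pvALoop, dif_pos hneg']
    simp only [Bool.false_eq_true, false_iff]
    rintro ⟨i, hsi, hil, hg⟩
    rw [pvGoodP] at hg
    by_cases hsl : start ≤ t.length
    · have hnin := (PySem.Chars.findFrom_natCast_eq_neg_one_iff t p start hsl).mp hneg'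
      exact hnin (pvPrefix_drop_infix t p start i hsi hg.1)
    · omega
  | case2 start _idx hneg _i _b _e _a hok =>
    have hneg' : ¬ PySem.Chars.findFrom t p (start : Int) none = -1 := hneg
    have hok' : (((PySem.Chars.findFrom t p (start : Int) none).toNat == 0 ||
        pvIsSep (t.getD ((PySem.Chars.findFrom t p (start : Int) none).toNat - 1) ' ')) &&
        ((PySem.Chars.findFrom t p (start : Int) none).toNat + p.length == t.length ||
        pvIsSep (t.getD ((PySem.Chars.findFrom t p (start : Int) none).toNat + p.length) ' '))) = true := hok
    have hsl : start ≤ t.length := by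
      by_contra hgt
      exact hneg' (pvFindFrom_of_len_lt t p start (by omega))
    have hspec := PySem.Chars.findFrom_natCast_spec t p start hsl hneg'
    rw [pvALoop, dif_neg hneg', if_pos hok']
    simp only [true_iff]
    refine ⟨(PySem.Chars.findFrom t p (start : Int) none).toNat, ?_,
      pvFindFrom_le_len t p start hsl hneg', ?_⟩
    · have := hspec.1; omega
    · rw [pvGoodP]
      exact ⟨hspec.2.1, (pvBound_iff t p _).mp hok'⟩
  | case3 start _idx hneg _i _b _e _a hok ih =>
    have hneg' : ¬ PySem.Chars.findFrom t p (start : Int) none = -1 := hneg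
    have hok' : ¬ (((PySem.Chars.findFrom t p (start : Int) none).toNat == 0 ||
        pvIsSep (t.getD ((PySem.Chars.findFrom t p (start : Int) none).toNat - 1) ' ')) &&
        ((PySem.Chars.findFrom t p (start : Int) none).toNat + p.length == t.length ||
        pvIsSep (t.getD ((PySem.Chars.findFrom t p (start : Int) none).toNat + p.length) ' '))) = true := hok
    have hsl : start ≤ t.length := by
      by_contra hgt
      exact hneg' (pvFindFrom_of_len_lt t p start (by omega))
    have hspec := PySem.Chars.findFrom_natCast_spec t p start hsl hneg'
    have hsi : start ≤ (PySem.Chars.findFrom t p (start : Int) none).toNat := by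
      have := hspec.1; omega
    rw [pvALoop, dif_neg hneg', if_neg hok']
    rw [ih]
    constructor
    · rintro ⟨j, hij, hjl, hg⟩
      exact ⟨j, by omega, hjl, hg⟩
    · rintro ⟨j, hsj, hjl, hg⟩
      refine ⟨j, ?_, hjl, hg⟩
      rcases Nat.lt_or_ge j ((PySem.Chars.findFrom t p (start : Int) none).toNat + 1) with hj | hj
      · rcases Nat.lt_or_ge j (PySem.Chars.findFrom t p (start : Int) none).toNat with hji | hji
        · rw [pvGoodP] at hg
          exact absurd hg.1 (hspec.2.2 j hsj hji)
        · have hji' : j = (PySem.Chars.findFrom t p (start : Int) none).toNat := by omega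
          subst hji'
          rw [pvGoodP] at hg
          exact absurd ((pvBound_iff t p _).mpr hg.2) hok'
      · exact hj

theorem pvTake_eq_iff (t p : List Char) (i : Nat) :
    (List.take p.length (List.drop i t) = p) ↔ p <+: t.drop i := by
  rw [List.prefix_iff_eq_take]; exact eq_comm

-- the loop body of B at position i is exactly pvGoodP t p i
theorem pvBody_eq (t p : List Char) (i : Nat) :
    (decide (PySem.List.slice t (some (i : Int)) (some ((i : Int) + (p.length : Int))) = p)
      && (((i : Int) == 0) || pvIsSep ((PySem.List.pyGet? t ((i : Int) - 1)).getD ' '))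
      && (((i : Int) + (p.length : Int) == (t.length : Int))
          || pvIsSep ((PySem.List.pyGet? t ((i : Int) + (p.length : Int))).getD ' '))) = true
    ↔ pvGoodP t p i := by
  rw [pvGoodP, PySem.List.slice_natCast_add]
  have h1 : ((i : Int) + (p.length : Int)) = ((i + p.length : Nat) : Int) := by push_cast; ring
  rw [h1, PySem.List.pyGet?_natCast]
  by_cases h0 : i = 0
  · subst h0
    simp only [pvTake_eq_iff, List.getD_eq_getElem?_getD, Bool.and_eq_true, Bool.or_eq_true,
      decide_eq_true_eq, beq_iff_eq, Nat.cast_inj, Nat.cast_eq_zero]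
    tauto
  · have h2 : ((i : Int) - 1) = ((i - 1 : Nat) : Int) := by omega
    rw [h2, PySem.List.pyGet?_natCast]
    simp only [pvTake_eq_iff, List.getD_eq_getElem?_getD, Bool.and_eq_true, Bool.or_eq_true,
      decide_eq_true_eq, beq_iff_eq, Nat.cast_inj, Nat.cast_eq_zero]
    tauto

theorem pvAlt_iff (title_lower phrase : String) :
    contains_edition_phrase_py_alt title_lower phrase = true ↔
      ∃ i, i ≤ title_lower.toList.length ∧ pvGoodP title_lower.toList phrase.toList i := by
  simp only [contains_edition_phrase_py_alt, List.any_eq_true]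
  constructor
  · rintro ⟨x, hx, hf⟩
    rw [PySem.List.mem_pyRange_one] at hx
    obtain ⟨hx0, hxlt⟩ := hx
    lift x to ℕ using hx0 with i
    refine ⟨i, by omega, (pvBody_eq _ _ i).mp hf⟩
  · rintro ⟨i, hil, hg⟩
    have hg' := hg
    rw [pvGoodP] at hg'
    have hm : phrase.toList.length ≤ title_lower.toList.length - i := by
      have hle := hg'.1.length_le
      rw [List.length_drop] at hle
      exact hle
    refine ⟨(i : Int), ?_, (pvBody_eq _ _ i).mpr hg⟩
    rw [PySem.List.mem_pyRange_one]
    omega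

-- ===== VERDICT (by name: the statement is the Claim_ definition above) =====
theorem contains_edition_phrase_py_spec : Claim_equal_contains_edition_phrase_py := by
  intro title_lower phrase _
  unfold Spec_contains_edition_phrase_py
  have hA := pvALoop_iff title_lower.toList phrase.toList 0
  have hB := pvAlt_iff title_lower phrase
  unfold contains_edition_phrase_py
  rcases hb : contains_edition_phrase_py_alt title_lower phrase with _ | _
  · rcases ha : pvALoop title_lower.toList phrase.toList 0 with _ | _
    · rfl
    · rw [ha] at hA; rw [hb] at hB
      obtain ⟨i, _, hlen, hg⟩ := hA.mp rfl
      exact absurd (hB.mpr ⟨i, hlen, hg⟩) (by simp)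
  · rw [hb] at hB
    obtain ⟨i, hlen, hg⟩ := hB.mp rfl
    exact hA.mpr ⟨i, Nat.zero_le _, hlen, hg⟩
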